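-- pv_equiv track=rewrite | github.com/lengye49/opm_data_analyzing_system | opm_hero_property/reload_from_spec.py | get_split_talent_value
-- ===== SOURCE A (Python) =====
-- def get_split_talent_value(s):
--     ss = s.split(';')
--     a = 0
--     b = 0
--     c = 0
--     d = 0
--     e = 0
--     f = 0
--     g = 0
--     h = 0
--     for x in ss:
--         sss = x.split(',')
--         if sss[0] == '22':
--             a = int(sss[1])
--         if sss[0] == '32':
--             b = int(sss[1])
--         if sss[0] == '42':
--             c = int(sss[1])
--         if sss[0] == '70':
--             d = int(sss[1])
--         if sss[0] == '60':
--             e = int(sss[1])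
--         if sss[0] == '150':
--             f = int(sss[1])
--         if sss[0] == '140':
--             g = int(sss[1])
--         if sss[0] == '50':
--             h = int(sss[1])
--     return a, b, c, d, e, f, g, h
-- ===== SOURCE B (Python) =====
-- def get_split_talent_value(s):
--     entries = [x.split(',') for x in s.split(';')]
--
--     def last_value(code):
--         # scan back-to-front: the last occurrence wins, stop at the first hit
--         for sss in reversed(entries):
--             if sss[0] == code:
--                 return int(sss[1])
--         return 0
--
--     return (last_value('22'), last_value('32'), last_value('42'),
--             last_value('70'), last_value('60'), last_value('150'),
--             last_value('140'), last_value('50'))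
-- ===== Notes on version B (the rewrite author's own statement) =====
-- stated objective: alternative
-- what changed: Replaces A's single forward pass with 8 scalar accumulators by a pre-split pass plus eight independent backward scans, each returning at the last occurrence of its code (early exit) or 0 when absent.
-- outside the precondition, e.g. on get_split_talent_value('22,x;22,5'): A raises ValueError, B returns (5, 0, 0, 0, 0, 0, 0, 0)
import Mathlib
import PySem

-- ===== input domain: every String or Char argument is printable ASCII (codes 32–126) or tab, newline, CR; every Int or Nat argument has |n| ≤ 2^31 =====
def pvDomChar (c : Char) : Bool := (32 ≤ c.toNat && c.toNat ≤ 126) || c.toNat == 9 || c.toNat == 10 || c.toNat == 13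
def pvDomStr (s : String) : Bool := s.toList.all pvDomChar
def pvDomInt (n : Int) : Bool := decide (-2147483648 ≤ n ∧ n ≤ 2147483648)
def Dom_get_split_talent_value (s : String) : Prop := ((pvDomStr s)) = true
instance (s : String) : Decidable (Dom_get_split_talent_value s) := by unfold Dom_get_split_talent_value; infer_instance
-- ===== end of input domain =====

-- ===== PORT A =====
-- B pre-splits the entries and does eight independent back-to-front scans with early exit
-- (last occurrence wins) instead of A's single forward pass over 8 accumulators (objective: alternative).
-- A-side step: the 8 sequential ifs of the Python loop body, over the 8-tuple state.
def gsA_step (st : Int × Int × Int × Int × Int × Int × Int × Int) (x : String)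
    : Int × Int × Int × Int × Int × Int × Int × Int :=
  let sss := ((PySem.Str.split? x ",").getD [])
  let c0 := sss.headD ""
  let (a, b, c, d, e, f, g, h) := st
  let a := if c0 = "22" then (PySem.Int.ofStr? (sss.getD 1 "")).getD 0 else a
  let b := if c0 = "32" then (PySem.Int.ofStr? (sss.getD 1 "")).getD 0 else b
  let c := if c0 = "42" then (PySem.Int.ofStr? (sss.getD 1 "")).getD 0 else c
  let d := if c0 = "70" then (PySem.Int.ofStr? (sss.getD 1 "")).getD 0 else d
  let e := if c0 = "60" then (PySem.Int.ofStr? (sss.getD 1 "")).getD 0 else e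
  let f := if c0 = "150" then (PySem.Int.ofStr? (sss.getD 1 "")).getD 0 else f
  let g := if c0 = "140" then (PySem.Int.ofStr? (sss.getD 1 "")).getD 0 else g
  let h := if c0 = "50" then (PySem.Int.ofStr? (sss.getD 1 "")).getD 0 else h
  (a, b, c, d, e, f, g, h)

def get_split_talent_value (s : String) : Int × Int × Int × Int × Int × Int × Int × Int :=
  (((PySem.Str.split? s ";").getD [])).foldl gsA_step (0, 0, 0, 0, 0, 0, 0, 0)

-- ===== PORT B =====
-- x.split(',') of one entry
def gsSplit (x : String) : List String := (PySem.Str.split? x ",").getD []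

-- int(sss[1]) (exact inside Pre_, where the parse succeeds)
def gsVal (sss : List String) : Int := (PySem.Int.ofStr? (sss.getD 1 "")).getD 0

-- B's last_value: scan the (already reversed) entry list, early return at the first hit, else 0.
def gsLastValue (code : String) : List (List String) → Int
  | [] => 0
  | sss :: rest => if sss.headD "" = code then gsVal sss else gsLastValue code rest

def get_split_talent_value_alt (s : String) : Int × Int × Int × Int × Int × Int × Int × Int :=
  let entries := (((PySem.Str.split? s ";").getD [])).map gsSplit
  let rev := entries.reverse
  (gsLastValue "22" rev, gsLastValue "32" rev, gsLastValue "42" rev, gsLastValue "70" rev,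
   gsLastValue "60" rev, gsLastValue "150" rev, gsLastValue "140" rev, gsLastValue "50" rev)

-- ===== PRECONDITION & SPEC =====
-- Pre_ excludes exactly the inputs where A raises: a semicolon-separated entry whose first
-- comma-field is one of the 8 target codes but whose second field is missing (IndexError)
-- or not an int literal (ValueError).
def Pre_get_split_talent_value (s : String) : Prop :=
  ∀ x ∈ ((PySem.Str.split? s ";").getD []),
    (((PySem.Str.split? x ",").getD [])).headD "" ∈ ["22", "32", "42", "70", "60", "150", "140", "50"] →
      (PySem.Int.ofStr? ((((PySem.Str.split? x ",").getD [])).getD 1 "")).isSome = true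

instance (s : String) : Decidable (Pre_get_split_talent_value s) := by
  unfold Pre_get_split_talent_value; infer_instance

def pvWitness_get_split_talent_value : String := "22,5;50,7;abc;150,3"

def Spec_get_split_talent_value (s : String) (out : Int × Int × Int × Int × Int × Int × Int × Int) : Prop := out = get_split_talent_value_alt s
instance (s : String) (out : Int × Int × Int × Int × Int × Int × Int × Int) : Decidable (Spec_get_split_talent_value s out) := by
  unfold Spec_get_split_talent_value
  haveI i2 : DecidableEq (Int × Int) := instDecidableEqProd
  haveI i3 : DecidableEq (Int × Int × Int) := instDecidableEqProd
  haveI i4 : DecidableEq (Int × Int × Int × Int) := instDecidableEqProd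
  haveI i5 : DecidableEq (Int × Int × Int × Int × Int) := instDecidableEqProd
  haveI i6 : DecidableEq (Int × Int × Int × Int × Int × Int) := instDecidableEqProd
  haveI i7 : DecidableEq (Int × Int × Int × Int × Int × Int × Int) := instDecidableEqProd
  haveI i8 : DecidableEq (Int × Int × Int × Int × Int × Int × Int × Int) := instDecidableEqProd
  exact i8 out (get_split_talent_value_alt s)

-- ===== CLAIM (what is proved, stated in full; the proofs are below) =====
def Claim_equal_get_split_talent_value : Prop := ∀ (s : String), Dom_get_split_talent_value s → Pre_get_split_talent_value s → Spec_get_split_talent_value s (get_split_talent_value s)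

-- ===== LEMMAS AND PROOFS =====

-- gsLastValue with an explicit default carried for the 'no hit' case (proof device matching A's
-- initial accumulator values).
def gsLastD (code : String) (dflt : Int) : List (List String) → Int
  | [] => dflt
  | sss :: rest => if sss.headD "" = code then gsVal sss else gsLastD code dflt rest

theorem gsLastD_zero (code : String) (l : List (List String)) :
    gsLastD code 0 l = gsLastValue code l := by
  induction l with
  | nil => rfl
  | cons sss rest ih => simp [gsLastD, gsLastValue, ih]

theorem gsLastD_append (code : String) (dflt : Int) (r : List (List String)) (sss : List String) :
    gsLastD code dflt (r ++ [sss]) =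
      gsLastD code (if sss.headD "" = code then gsVal sss else dflt) r := by
  induction r with
  | nil => rfl
  | cons y ys ih => simp [gsLastD, ih]

-- A's forward fold over raw entries equals the backward default-carrying scans, componentwise.
theorem gsA_foldl_eq (l : List String) (a b c d e f g h : Int) :
    l.foldl gsA_step (a, b, c, d, e, f, g, h) =
      (gsLastD "22" a ((l.map gsSplit).reverse),
       gsLastD "32" b ((l.map gsSplit).reverse),
       gsLastD "42" c ((l.map gsSplit).reverse),
       gsLastD "70" d ((l.map gsSplit).reverse),
       gsLastD "60" e ((l.map gsSplit).reverse),
       gsLastD "150" f ((l.map gsSplit).reverse),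
       gsLastD "140" g ((l.map gsSplit).reverse),
       gsLastD "50" h ((l.map gsSplit).reverse)) := by
  induction l generalizing a b c d e f g h with
  | nil => rfl
  | cons x xs ih =>
      simp only [List.foldl_cons, List.map_cons, List.reverse_cons]
      rw [show gsA_step (a, b, c, d, e, f, g, h) x =
            ((if (gsSplit x).headD "" = "22" then gsVal (gsSplit x) else a),
             (if (gsSplit x).headD "" = "32" then gsVal (gsSplit x) else b),
             (if (gsSplit x).headD "" = "42" then gsVal (gsSplit x) else c),
             (if (gsSplit x).headD "" = "70" then gsVal (gsSplit x) else d),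
             (if (gsSplit x).headD "" = "60" then gsVal (gsSplit x) else e),
             (if (gsSplit x).headD "" = "150" then gsVal (gsSplit x) else f),
             (if (gsSplit x).headD "" = "140" then gsVal (gsSplit x) else g),
             (if (gsSplit x).headD "" = "50" then gsVal (gsSplit x) else h)) from by
        simp [gsA_step, gsSplit, gsVal]]
      rw [ih]
      simp only [gsLastD_append]

-- ===== VERDICT (by name: the statement is the Claim_ definition above) =====
theorem get_split_talent_value_spec : Claim_equal_get_split_talent_value := by
  intro s _ _
  unfold Spec_get_split_talent_value get_split_talent_value get_split_talent_value_alt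
  rw [gsA_foldl_eq]
  simp only [gsLastD_zero]
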